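-- pv_equiv track=rewrite | github.com/patricknb/listas-de-atividades | lista-02/processa-numeros/model/processa_numeros.py | soma_pos_pares_pos_impares
-- ===== SOURCE A (Python) =====
-- def soma_pos_pares_pos_impares(numeros):
--     """Calcula a soma dos números em posições pares e em posições ímpares.
--
--     Retorna uma lista de tamanho 2 onde o primeiro número contém a soma dos
--     números em posições pares (0, 2, 4, etc) e o segundo a soma dos números em posições
--     ímpares (1, 3, 5, etc). Se a lista de números tiver menos de dois números então o método
--     retorna None para indicar que o problema não tem solução.
--     """
--     if len(numeros) < 2:
--
--         return None
--
--     resultado = [0, 0]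
--
--     for i in range(len(numeros)):
--         if i % 2 == 0:
--             resultado[0] += numeros[i]
--         else:
--             resultado[1] += numeros[i]
--
--     return resultado
-- ===== SOURCE B (Python) =====
-- def soma_pos_pares_pos_impares(numeros):
--     if len(numeros) < 2:
--         return None
--     return [sum(numeros[0::2]), sum(numeros[1::2])]
-- ===== Notes on version B (the rewrite author's own statement) =====
-- stated objective: simpler
-- what changed: Replaces the index loop with its modulo branch and mutable accumulator list by two strided slices summed directly.
import Mathlib
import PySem

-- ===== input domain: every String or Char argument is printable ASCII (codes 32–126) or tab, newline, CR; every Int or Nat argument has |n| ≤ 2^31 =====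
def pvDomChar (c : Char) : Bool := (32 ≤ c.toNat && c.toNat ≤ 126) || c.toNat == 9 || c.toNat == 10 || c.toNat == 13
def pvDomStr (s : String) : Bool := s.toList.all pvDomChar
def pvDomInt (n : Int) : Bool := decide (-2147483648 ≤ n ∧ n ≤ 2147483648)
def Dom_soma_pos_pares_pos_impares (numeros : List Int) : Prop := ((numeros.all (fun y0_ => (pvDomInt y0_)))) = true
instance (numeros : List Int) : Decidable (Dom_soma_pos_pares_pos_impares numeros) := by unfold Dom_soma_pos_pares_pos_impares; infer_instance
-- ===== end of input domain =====

-- B replaces A's index loop with a modulo branch by two strided slices summed directly (simpler).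

-- ===== PORT A =====
-- 'for i in range(len(numeros))' with 'numeros[i]': i is always in range, so xs[i] is pyGetD.
def soma_pos_pares_pos_impares (numeros : List Int) : Option (List Int) :=
  if numeros.length < 2 then none
  else
    let resultado : Int × Int :=
      (PySem.List.pyRange 0 (numeros.length : Int) 1).foldl
        (fun r i =>
          if i % 2 == 0 then (r.1 + PySem.List.pyGetD numeros i 0, r.2)
          else (r.1, r.2 + PySem.List.pyGetD numeros i 0))
        (0, 0)
    some [resultado.1, resultado.2]

-- ===== PORT B =====
-- hand port of the stride-2 slice xs[0::2] (PySem has no stepped slice); exact: every second element.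
def pvStride2 : List Int → List Int
  | [] => []
  | [x] => [x]
  | x :: _ :: rest => x :: pvStride2 rest

def soma_pos_pares_pos_impares_alt (numeros : List Int) : Option (List Int) :=
  if numeros.length < 2 then none
  else some [(pvStride2 numeros).sum, (pvStride2 numeros.tail).sum]

-- ===== PRECONDITION & SPEC =====
def Spec_soma_pos_pares_pos_impares (numeros : List Int) (out : Option (List Int)) : Prop := out = soma_pos_pares_pos_impares_alt numeros
instance (numeros : List Int) (out : Option (List Int)) : Decidable (Spec_soma_pos_pares_pos_impares numeros out) := by unfold Spec_soma_pos_pares_pos_impares; infer_instance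

-- ===== CLAIM (what is proved, stated in full; the proofs are below) =====
def Claim_equal_soma_pos_pares_pos_impares : Prop := ∀ (numeros : List Int), Dom_soma_pos_pares_pos_impares numeros → Spec_soma_pos_pares_pos_impares numeros (soma_pos_pares_pos_impares numeros)

-- ===== LEMMAS AND PROOFS =====

lemma pvStride2_cons (y : Int) (rest : List Int) :
    pvStride2 (y :: rest) = y :: pvStride2 rest.tail := by
  cases rest <;> simp [pvStride2]

lemma pv_loop (ys : List Int) : ∀ (numeros : List Int) (a : Nat) (r0 r1 : Int),
    numeros.drop a = ys → a % 2 = 0 →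
    (PySem.List.pyRange (a : Int) (numeros.length : Int) 1).foldl
      (fun r i =>
        if i % 2 == 0 then (r.1 + PySem.List.pyGetD numeros i 0, r.2)
        else (r.1, r.2 + PySem.List.pyGetD numeros i 0))
      (r0, r1)
      = (r0 + (pvStride2 ys).sum, r1 + (pvStride2 ys.tail).sum) := by
  induction ys using pvStride2.induct with
  | case1 =>
    intro numeros a r0 r1 hd _
    have hle : numeros.length ≤ a := by
      simpa [List.drop_eq_nil_iff] using hd
    rw [PySem.List.pyRange_one_eq_nil (by exact_mod_cast hle)]
    simp [pvStride2]
  | case2 x =>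
    intro numeros a r0 r1 hd hpar
    have hlen : numeros.length = a + 1 := by
      have := congrArg List.length hd
      simp [List.length_drop] at this
      omega
    have ha : a < numeros.length := by omega
    have hget : numeros[a]? = some x := by
      have h0 : (numeros.drop a)[0]? = numeros[a+0]? := List.getElem?_drop
      rw [hd] at h0
      simpa using h0.symm
    have hmod : ((a : Int) % 2 == 0) = true := by
      simp; omega
    rw [hlen]
    push_cast
    rw [PySem.List.pyRange_one_singleton]
    simp [List.foldl, hmod, PySem.List.pyGetD_natCast, List.getD_eq_getElem?_getD,
      hget, pvStride2]
  | case3 x y rest ih =>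
    intro numeros a r0 r1 hd hpar
    have hlen : a + 2 ≤ numeros.length := by
      have := congrArg List.length hd
      simp [List.length_drop] at this
      omega
    have ha : a < numeros.length := by omega
    have ha1 : a + 1 < numeros.length := by omega
    have hgx : numeros[a]? = some x := by
      have h0 : (numeros.drop a)[0]? = numeros[a+0]? := List.getElem?_drop
      rw [hd] at h0
      simpa using h0.symm
    have hgy : numeros[a+1]? = some y := by
      have h0 : (numeros.drop a)[1]? = numeros[a+1]? := List.getElem?_drop
      rw [hd] at h0
      simpa using h0.symm
    have hdrop : numeros.drop (a + 2) = rest := by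
      have : (numeros.drop a).drop 2 = rest := by simp [hd]
      simpa [List.drop_drop, Nat.add_comm] using this
    have hmodx : ((a : Int) % 2 == 0) = true := by simp; omega
    have hmody : (((a : Int) + 1) % 2 == 0) = false := by simp; omega
    rw [PySem.List.pyRange_one_cons (by exact_mod_cast ha)]
    rw [PySem.List.pyRange_one_cons (by exact_mod_cast ha1)]
    simp only [List.foldl_cons, hmodx, hmody, if_true]
    have hstep : ((a : Int) + 1 + 1) = ((a + 2 : Nat) : Int) := by push_cast; ring
    rw [hstep]
    rw [ih numeros (a + 2) _ _ hdrop (by omega)]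
    have e1 : PySem.List.pyGetD numeros (a : Int) 0 = x := by
      simp [PySem.List.pyGetD_natCast, List.getD_eq_getElem?_getD, hgx]
    have hgy' : numeros[a + 1] = y := by
      simpa [List.getElem?_eq_getElem ha1] using hgy
    have e2 : PySem.List.pyGetD numeros ((a : Int) + 1) 0 = y := by
      rw [PySem.List.pyGetD_eq_getElem numeros 0 (by omega) (by exact_mod_cast ha1)]
      have ht : ((a : Int) + 1).toNat = a + 1 := by omega
      simpa [ht] using hgy'
    simp [e1, e2, pvStride2, pvStride2_cons]
    constructor <;> ring

-- ===== VERDICT (by name: the statement is the Claim_ definition above) =====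
theorem soma_pos_pares_pos_impares_spec : Claim_equal_soma_pos_pares_pos_impares := by
  intro numeros _
  unfold Spec_soma_pos_pares_pos_impares soma_pos_pares_pos_impares soma_pos_pares_pos_impares_alt
  by_cases h : numeros.length < 2
  · simp [h]
  · simp only [h, if_false]
    have := pv_loop numeros numeros 0 0 0 (by simp) (by simp)
    simp only [Nat.cast_zero] at this
    rw [this]
    simp
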